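-- pv_equiv track=rewrite | github.com/s16173760/m_flow | m_flow/adapters/graph/kuzu/adapter.py | _partition_edges_by_endpoints
-- ===== SOURCE A (Python) =====
-- from typing import TYPE_CHECKING, Any, Dict, List, Optional, Tuple, Type, Union
--
-- def _partition_edges_by_endpoints(
--     edges: List[Tuple[str, str, str, Dict[str, Any]]],
-- ) -> List[List[Tuple[str, str, str, Dict[str, Any]]]]:
--     """Partition edges so no two edges in the same batch share an endpoint.
--
--     Kuzu's UNWIND+MERGE internally modifies endpoint node rows (adjacency
--     lists). Two MERGE operations touching the same endpoint within a single
--     statement trigger a write-write conflict. Splitting edges into batches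
--     where each batch has no shared endpoints avoids this.
--
--     Algorithm: greedy placement — for each edge, find the first batch whose
--     node set contains neither src nor tgt. O(E*B) where B is typically small.
--     """
--     if not edges:
--         return []
--
--     batches: List[Tuple[set, List]] = []  # [(graph_scope, edge_list), ...]
--
--     for edge in edges:
--         src, tgt = str(edge[0]), str(edge[1])
--         placed = False
--         for batch_nodes, batch_edges in batches:
--             if src not in batch_nodes and tgt not in batch_nodes:
--                 batch_nodes.add(src)
--                 batch_nodes.add(tgt)
--                 batch_edges.append(edge)
--                 placed = True
--                 break
--         if not placed:
--             batches.append(({src, tgt}, [edge]))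
--
--     return [b[1] for b in batches]
-- ===== SOURCE B (Python) =====
-- def _partition_edges_by_endpoints(edges):
--     """Greedy first-fit via an inverted node->batch-indices index (no scan over batches per edge)."""
--     node_batches = {}
--     batches = []
--     for edge in edges:
--         src, tgt = str(edge[0]), str(edge[1])
--         blocked = node_batches.get(src, set()) | node_batches.get(tgt, set())
--         idx = 0
--         while idx in blocked:
--             idx += 1
--         if idx == len(batches):
--             batches.append([edge])
--         else:
--             batches[idx].append(edge)
--         node_batches.setdefault(src, set()).add(idx)
--         node_batches.setdefault(tgt, set()).add(idx)
--     return batches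
-- ===== Notes on version B (the rewrite author's own statement) =====
-- stated objective: alternative
-- what changed: Replaces A's per-edge linear scan over all batch node-sets by an inverted index node -> set of occupied batch indices: per edge it unions the two endpoints' blocked-index sets and places the edge at the smallest index not in that union.
import Mathlib
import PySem

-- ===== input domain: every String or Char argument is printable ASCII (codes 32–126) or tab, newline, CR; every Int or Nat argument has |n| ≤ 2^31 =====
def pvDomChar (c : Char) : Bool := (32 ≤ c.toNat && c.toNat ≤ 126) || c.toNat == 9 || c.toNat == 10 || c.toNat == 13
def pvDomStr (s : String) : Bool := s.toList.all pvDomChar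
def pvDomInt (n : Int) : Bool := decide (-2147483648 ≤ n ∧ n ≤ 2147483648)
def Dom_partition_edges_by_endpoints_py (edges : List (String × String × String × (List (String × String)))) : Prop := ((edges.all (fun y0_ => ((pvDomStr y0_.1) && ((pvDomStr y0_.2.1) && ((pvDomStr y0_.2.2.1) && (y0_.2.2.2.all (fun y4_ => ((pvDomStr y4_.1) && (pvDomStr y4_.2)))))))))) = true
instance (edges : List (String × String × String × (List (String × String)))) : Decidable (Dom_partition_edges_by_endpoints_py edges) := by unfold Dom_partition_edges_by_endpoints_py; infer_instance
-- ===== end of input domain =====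

-- B replaces A's per-edge scan over all batch node-sets by an inverted index node -> set of
-- batch indices; equal return values are proved (neither version mutates its argument).

abbrev PVEdge := String × String × String × (List (String × String))

-- ===== PORT A =====
-- inner 'for batch_nodes, batch_edges in batches: …' scan with first-fit placement
def pvPlaceA (src tgt : String) (edge : PVEdge) :
    List (PySem.Set String × List PVEdge) → List (PySem.Set String × List PVEdge)
  | [] => [(PySem.Set.ofList [src, tgt], [edge])]          -- 'batches.append(({src, tgt}, [edge]))'
  | (bn, be) :: rest =>
      if src ∉ bn ∧ tgt ∉ bn then
        (PySem.Set.add (PySem.Set.add bn src) tgt, be ++ [edge]) :: rest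
      else (bn, be) :: pvPlaceA src tgt edge rest

-- str(edge[0]) / str(edge[1]) on values that are already str is the identity: ported as edge.1 / edge.2.1
def partition_edges_by_endpoints_py (edges : List (String × String × String × (List (String × String)))) : List (List (String × String × String × (List (String × String)))) :=
  if edges = [] then []
  else (edges.foldl (fun bs e => pvPlaceA e.1 e.2.1 e bs) []).map (·.2)

-- ===== PORT B =====
-- 'idx = 0; while idx in blocked: idx += 1' — fuel |blocked|+1 is enough: the smallest free
-- index is at most |blocked| (blocked holds distinct naturals), see pvMex_eq_find below
def pvMex (blocked : List Nat) : Nat → Nat → Nat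
  | 0, i => i
  | f + 1, i => if i ∈ blocked then pvMex blocked f (i + 1) else i

def pvStepB (st : PySem.Dict String (PySem.Set Nat) × List (List PVEdge)) (edge : PVEdge) :
    PySem.Dict String (PySem.Set Nat) × List (List PVEdge) :=
  let src := edge.1                                        -- str(edge[0])
  let tgt := edge.2.1                                      -- str(edge[1])
  let blocked := PySem.Set.union (st.1.getD src PySem.Set.empty) (st.1.getD tgt PySem.Set.empty)
  let idx := pvMex blocked (blocked.length + 1) 0
  let batches := if idx = st.2.length then st.2 ++ [[edge]] else st.2.modify idx (· ++ [edge])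
  let d1 := st.1.insert src (PySem.Set.add (st.1.getD src PySem.Set.empty) idx)  -- setdefault(src,set()).add(idx)
  let d2 := d1.insert tgt (PySem.Set.add (d1.getD tgt PySem.Set.empty) idx)      -- setdefault(tgt,set()).add(idx)
  (d2, batches)

def partition_edges_by_endpoints_py_alt (edges : List (String × String × String × (List (String × String)))) : List (List (String × String × String × (List (String × String)))) :=
  (edges.foldl pvStepB (PySem.Dict.empty, [])).2

-- ===== PRECONDITION & SPEC =====
def Spec_partition_edges_by_endpoints_py (edges : List (String × String × String × (List (String × String)))) (out : List (List (String × String × String × (List (String × String))))) : Prop := out = partition_edges_by_endpoints_py_alt edges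
instance (edges : List (String × String × String × (List (String × String)))) (out : List (List (String × String × String × (List (String × String))))) : Decidable (Spec_partition_edges_by_endpoints_py edges out) := by
  unfold Spec_partition_edges_by_endpoints_py
  exact @instDecidableEqList _ (@instDecidableEqList _ inferInstance) out (partition_edges_by_endpoints_py_alt edges)

-- ===== CLAIM (what is proved, stated in full; the proofs are below) =====
def Claim_equal_partition_edges_by_endpoints_py : Prop := ∀ (edges : List (String × String × String × (List (String × String)))), Dom_partition_edges_by_endpoints_py edges → Spec_partition_edges_by_endpoints_py edges (partition_edges_by_endpoints_py edges)

-- ===== LEMMAS AND PROOFS =====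

-- the index of the batch A's scan picks (bs.length = 'no batch fits, append a new one')
def pvIdxA (src tgt : String) : List (PySem.Set String × List PVEdge) → Nat
  | [] => 0
  | (bn, _) :: rest => if src ∉ bn ∧ tgt ∉ bn then 0 else pvIdxA src tgt rest + 1

lemma pvIdxA_le (src tgt : String) (bs : List (PySem.Set String × List PVEdge)) :
    pvIdxA src tgt bs ≤ bs.length := by
  induction bs with
  | nil => simp [pvIdxA]
  | cons b rest ih =>
      obtain ⟨bn, be⟩ := b
      simp only [pvIdxA, List.length_cons]
      split <;> omega

lemma pvIdxA_blocked (src tgt : String) (bs : List (PySem.Set String × List PVEdge))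
    (j : Nat) (hj : j < pvIdxA src tgt bs) :
    ∃ p, bs[j]? = some p ∧ (src ∈ p.1 ∨ tgt ∈ p.1) := by
  induction bs generalizing j with
  | nil => simp [pvIdxA] at hj
  | cons b rest ih =>
      obtain ⟨bn, be⟩ := b
      simp only [pvIdxA] at hj
      split at hj
      · omega
      · rename_i h
        cases j with
        | zero =>
            refine ⟨(bn, be), rfl, ?_⟩
            by_cases hs : src ∈ bn
            · exact Or.inl hs
            · by_cases ht : tgt ∈ bn
              · exact Or.inr ht
              · exact absurd ⟨hs, ht⟩ h
        | succ j' =>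
            have := ih j' (by omega)
            simpa using this

lemma pvIdxA_free (src tgt : String) (bs : List (PySem.Set String × List PVEdge)) :
    ∀ p, bs[pvIdxA src tgt bs]? = some p → src ∉ p.1 ∧ tgt ∉ p.1 := by
  induction bs with
  | nil => simp [pvIdxA]
  | cons b rest ih =>
      obtain ⟨bn, be⟩ := b
      intro p hp
      simp only [pvIdxA] at hp
      split at hp
      · rename_i h
        simp only [List.getElem?_cons_zero, Option.some.injEq] at hp
        subst hp; exact h
      · simp only [List.getElem?_cons_succ] at hp
        exact ih p hp

lemma pvPlaceA_eq (src tgt : String) (edge : PVEdge) (bs : List (PySem.Set String × List PVEdge)) :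
    pvPlaceA src tgt edge bs =
      if pvIdxA src tgt bs = bs.length then bs ++ [(PySem.Set.ofList [src, tgt], [edge])]
      else bs.modify (pvIdxA src tgt bs)
        (fun p => (PySem.Set.add (PySem.Set.add p.1 src) tgt, p.2 ++ [edge])) := by
  induction bs with
  | nil => simp [pvPlaceA, pvIdxA]
  | cons b rest ih =>
      obtain ⟨bn, be⟩ := b
      simp only [pvPlaceA, pvIdxA]
      by_cases h : src ∉ bn ∧ tgt ∉ bn
      · simp [h, List.length_cons, List.modify]
      · have hlen : pvIdxA src tgt rest + 1 = rest.length + 1 ↔ pvIdxA src tgt rest = rest.length := by omega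
        simp only [if_neg h, List.length_cons, hlen, ih]
        split <;> simp [List.modify]

-- pvMex computes the least index not in blocked, provided the fuel reaches it
lemma pvMex_eq (blocked : List Nat) (m : Nat) (hm : m ∉ blocked)
    (hbelow : ∀ j < m, j ∈ blocked) :
    ∀ fuel i, i ≤ m → m ≤ i + fuel → pvMex blocked fuel i = m := by
  intro fuel
  induction fuel with
  | zero => intro i h1 h2; simp only [pvMex]; omega
  | succ f ih =>
      intro i h1 h2
      simp only [pvMex]
      by_cases hi : i ∈ blocked
      · have hne : i ≠ m := fun h => hm (h ▸ hi)
        rw [if_pos hi]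
        exact ih (i + 1) (by omega) (by omega)
      · rw [if_neg hi]
        have hlt : ¬ i < m := fun h => hi (hbelow i h)
        omega

-- the least free index is at most blocked.length when blocked has no duplicates
lemma pvMex_bound (blocked : List Nat) (hnd : blocked.Nodup) (k : Nat)
    (hbelow : ∀ j < k, j ∈ blocked) : k ≤ blocked.length := by
  have hsub : (List.range k).toFinset ⊆ blocked.toFinset := by
    intro x hx
    simp only [List.mem_toFinset, List.mem_range] at hx ⊢
    exact hbelow x hx
  have h1 : (List.range k).toFinset.card = k := by
    rw [List.toFinset_card_of_nodup (List.nodup_range)]; simp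
  have h2 : blocked.toFinset.card = blocked.length := List.toFinset_card_of_nodup hnd
  have := Finset.card_le_card hsub
  omega

-- the simulation invariant: d is the inverted index of the batch node-sets bs
def pvInv (bs : List (PySem.Set String × List PVEdge)) (d : PySem.Dict String (PySem.Set Nat)) : Prop :=
  (∀ (n : String) (i : Nat), i ∈ d.getD n PySem.Set.empty ↔ ∃ p, bs[i]? = some p ∧ n ∈ p.1)
  ∧ (∀ n : String, (d.getD n PySem.Set.empty : List Nat).Nodup)

-- mapping (·.2) commutes with A's in-place batch update
lemma pvMapModify (bs : List (PySem.Set String × List PVEdge)) (k : Nat) (src tgt : String) (edge : PVEdge) :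
    (bs.map (·.2)).modify k (· ++ [edge]) =
    (bs.modify k (fun p => (PySem.Set.add (PySem.Set.add p.1 src) tgt, p.2 ++ [edge]))).map (·.2) := by
  apply List.ext_getElem?
  intro j
  simp only [List.getElem?_map, List.getElem?_modify]
  cases bs[j]? <;> simp
  split <;> rfl

-- membership in the node sets of the updated batch list
lemma pvPlaceA_nodes (src tgt : String) (edge : PVEdge) (bs : List (PySem.Set String × List PVEdge))
    (hfree : ∀ p, bs[pvIdxA src tgt bs]? = some p → src ∉ p.1 ∧ tgt ∉ p.1)
    (n : String) (i : Nat) :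
    (∃ p, (pvPlaceA src tgt edge bs)[i]? = some p ∧ n ∈ p.1) ↔
      (∃ p, bs[i]? = some p ∧ n ∈ p.1) ∨ (i = pvIdxA src tgt bs ∧ (n = src ∨ n = tgt)) := by
  rw [pvPlaceA_eq]
  by_cases hk : pvIdxA src tgt bs = bs.length
  · rw [if_pos hk]
    rcases Nat.lt_trichotomy i bs.length with hlt | heq | hgt
    · rw [List.getElem?_append_left hlt]
      constructor
      · exact fun h => Or.inl h
      · rintro (h | ⟨hik, _⟩)
        · exact h
        · omega
    · subst heq
      rw [List.getElem?_append_right (le_refl _)]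
      simp only [Nat.sub_self, List.getElem?_cons_zero, Option.some.injEq]
      have hnone : bs[bs.length]? = none := List.getElem?_eq_none (le_refl _)
      constructor
      · rintro ⟨p, hp, hn⟩
        subst hp
        simp only [PySem.Set.mem_ofList, List.mem_cons, List.not_mem_nil, or_false] at hn
        exact Or.inr ⟨hk.symm, hn⟩
      · rintro (⟨p, hp, _⟩ | ⟨_, hn⟩)
        · rw [hnone] at hp; exact absurd hp (by simp)
        · refine ⟨_, rfl, ?_⟩
          rw [PySem.Set.mem_ofList]
          simpa using hn
    · have h1 : bs.length ≤ i := by omega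
      rw [List.getElem?_append_right h1]
      rw [List.getElem?_eq_none (by simp; omega : ([(PySem.Set.ofList [src, tgt], [edge])] : List (PySem.Set String × List PVEdge)).length ≤ i - bs.length)]
      rw [List.getElem?_eq_none h1]
      constructor
      · rintro ⟨p, hp, _⟩; exact absurd hp (by simp)
      · rintro (⟨p, hp, _⟩ | ⟨hik, _⟩)
        · exact absurd hp (by simp)
        · omega
  · rw [if_neg hk]
    have hklt : pvIdxA src tgt bs < bs.length := lt_of_le_of_ne (pvIdxA_le src tgt bs) hk
    by_cases hik : i = pvIdxA src tgt bs
    · subst hik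
      rw [List.getElem?_modify]
      have hp0 : bs[pvIdxA src tgt bs]? = some (bs[pvIdxA src tgt bs]'hklt) :=
        List.getElem?_eq_getElem hklt
      rw [hp0]
      simp only [Option.map_eq_map, Option.map_some, if_true, Option.some.injEq]
      obtain ⟨hs0, ht0⟩ := hfree _ hp0
      constructor
      · rintro ⟨p, hp, hn⟩
        subst hp
        simp only [PySem.Set.mem_add] at hn
        rcases hn with (hn | hn) | hn
        · exact Or.inl ⟨_, rfl, hn⟩
        · exact Or.inr ⟨by trivial, Or.inl hn⟩
        · exact Or.inr ⟨by trivial, Or.inr hn⟩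
      · rintro (⟨p, hp, hn⟩ | ⟨_, hn⟩)
        · subst hp
          refine ⟨_, rfl, ?_⟩
          simp only [PySem.Set.mem_add]
          tauto
        · refine ⟨_, rfl, ?_⟩
          simp only [PySem.Set.mem_add]
          tauto
    · rw [List.getElem?_modify]
      cases hbj : bs[i]? with
      | none => simp [hik]
      | some p =>
          have hne : ¬ (pvIdxA src tgt bs = i) := fun h => hik (Eq.symm h)
          simp only [Option.map_eq_map, Option.map_some, hne, if_false, Option.some.injEq]
          constructor
          · rintro ⟨q, hq, hn⟩; cases hq; exact Or.inl ⟨p, rfl, hn⟩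
          · rintro (⟨q, hq, hn⟩ | ⟨h, _⟩)
            · cases hq; exact ⟨p, rfl, hn⟩
            · exact absurd h hik

-- membership in the inverted index after the two dict updates
lemma pvDictUpdate_mem (d : PySem.Dict String (PySem.Set Nat)) (src tgt : String) (k : Nat)
    (n : String) (j : Nat) :
    j ∈ ((d.insert src (PySem.Set.add (d.getD src PySem.Set.empty) k)).insert tgt
          (PySem.Set.add ((d.insert src (PySem.Set.add (d.getD src PySem.Set.empty) k)).getD tgt PySem.Set.empty) k)).getD n PySem.Set.empty ↔
      j ∈ d.getD n PySem.Set.empty ∨ (j = k ∧ (n = src ∨ n = tgt)) := by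
  rw [PySem.Dict.getD_insert]
  by_cases hnt : n = tgt
  · rw [if_pos hnt]
    rw [PySem.Set.mem_add, PySem.Dict.getD_insert]
    by_cases hts : tgt = src
    · rw [if_pos hts, PySem.Set.mem_add]
      subst hnt; subst hts
      tauto
    · rw [if_neg hts]
      subst hnt
      tauto
  · rw [if_neg hnt, PySem.Dict.getD_insert]
    by_cases hns : n = src
    · rw [if_pos hns, PySem.Set.mem_add]
      subst hns
      tauto
    · rw [if_neg hns]
      tauto

-- node sets in the inverted index stay duplicate-free
lemma pvDictUpdate_nodup (d : PySem.Dict String (PySem.Set Nat)) (src tgt : String) (k : Nat)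
    (hnd : ∀ n : String, (d.getD n PySem.Set.empty : List Nat).Nodup) (n : String) :
    (((d.insert src (PySem.Set.add (d.getD src PySem.Set.empty) k)).insert tgt
          (PySem.Set.add ((d.insert src (PySem.Set.add (d.getD src PySem.Set.empty) k)).getD tgt PySem.Set.empty) k)).getD n PySem.Set.empty : List Nat).Nodup := by
  rw [PySem.Dict.getD_insert]
  by_cases hnt : n = tgt
  · rw [if_pos hnt]
    apply PySem.Set.nodup_add
    rw [PySem.Dict.getD_insert]
    by_cases hts : tgt = src
    · rw [if_pos hts]; exact PySem.Set.nodup_add _ _ (hnd src)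
    · rw [if_neg hts]; exact hnd tgt
  · rw [if_neg hnt, PySem.Dict.getD_insert]
    by_cases hns : n = src
    · rw [if_pos hns]; exact PySem.Set.nodup_add _ _ (hnd src)
    · rw [if_neg hns]; exact hnd n

lemma pvStep_sim (bs : List (PySem.Set String × List PVEdge)) (d : PySem.Dict String (PySem.Set Nat))
    (hInv : pvInv bs d) (edge : PVEdge) :
    (pvStepB (d, bs.map (·.2)) edge).2 = (pvPlaceA edge.1 edge.2.1 edge bs).map (·.2)
    ∧ pvInv (pvPlaceA edge.1 edge.2.1 edge bs) (pvStepB (d, bs.map (·.2)) edge).1 := by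
  obtain ⟨hmemInv, hndInv⟩ := hInv
  have hchar : ∀ j : Nat,
      j ∈ PySem.Set.union (d.getD edge.1 PySem.Set.empty) (d.getD edge.2.1 PySem.Set.empty) ↔
      ∃ p, bs[j]? = some p ∧ (edge.1 ∈ p.1 ∨ edge.2.1 ∈ p.1) := by
    intro j
    rw [PySem.Set.mem_union, hmemInv edge.1 j, hmemInv edge.2.1 j]
    constructor
    · rintro (⟨p, hp, h⟩ | ⟨p, hp, h⟩)
      · exact ⟨p, hp, Or.inl h⟩
      · exact ⟨p, hp, Or.inr h⟩
    · rintro ⟨p, hp, h | h⟩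
      · exact Or.inl ⟨p, hp, h⟩
      · exact Or.inr ⟨p, hp, h⟩
  have hbelow : ∀ j < pvIdxA edge.1 edge.2.1 bs,
      j ∈ PySem.Set.union (d.getD edge.1 PySem.Set.empty) (d.getD edge.2.1 PySem.Set.empty) :=
    fun j hj => (hchar j).mpr (pvIdxA_blocked edge.1 edge.2.1 bs j hj)
  have hkfree : pvIdxA edge.1 edge.2.1 bs ∉
      PySem.Set.union (d.getD edge.1 PySem.Set.empty) (d.getD edge.2.1 PySem.Set.empty) := by
    intro hmem
    obtain ⟨p, hp, hor⟩ := (hchar _).mp hmem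
    obtain ⟨h1, h2⟩ := pvIdxA_free edge.1 edge.2.1 bs p hp
    cases hor with
    | inl h => exact h1 h
    | inr h => exact h2 h
  have hnd : (PySem.Set.union (d.getD edge.1 PySem.Set.empty) (d.getD edge.2.1 PySem.Set.empty) : List Nat).Nodup :=
    PySem.Set.nodup_union _ _ (hndInv edge.1)
  have hkle := pvMex_bound _ hnd _ hbelow
  have hmex : pvMex (PySem.Set.union (d.getD edge.1 PySem.Set.empty) (d.getD edge.2.1 PySem.Set.empty))
      ((PySem.Set.union (d.getD edge.1 PySem.Set.empty) (d.getD edge.2.1 PySem.Set.empty) : List Nat).length + 1) 0 =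
      pvIdxA edge.1 edge.2.1 bs :=
    pvMex_eq _ _ hkfree hbelow _ 0 (Nat.zero_le _) (by omega)
  have hstep : pvStepB (d, bs.map (·.2)) edge =
      ((d.insert edge.1 (PySem.Set.add (d.getD edge.1 PySem.Set.empty) (pvIdxA edge.1 edge.2.1 bs))).insert edge.2.1
          (PySem.Set.add ((d.insert edge.1 (PySem.Set.add (d.getD edge.1 PySem.Set.empty) (pvIdxA edge.1 edge.2.1 bs))).getD edge.2.1 PySem.Set.empty) (pvIdxA edge.1 edge.2.1 bs)),
       if pvIdxA edge.1 edge.2.1 bs = (bs.map (·.2)).length then bs.map (·.2) ++ [[edge]]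
       else (bs.map (·.2)).modify (pvIdxA edge.1 edge.2.1 bs) (· ++ [edge])) := by
    show (let src := edge.1
          let tgt := edge.2.1
          let blocked := PySem.Set.union (d.getD src PySem.Set.empty) (d.getD tgt PySem.Set.empty)
          let idx := pvMex blocked (blocked.length + 1) 0
          let batches := if idx = (bs.map (·.2)).length then bs.map (·.2) ++ [[edge]] else (bs.map (·.2)).modify idx (· ++ [edge])
          let d1 := d.insert src (PySem.Set.add (d.getD src PySem.Set.empty) idx)
          let d2 := d1.insert tgt (PySem.Set.add (d1.getD tgt PySem.Set.empty) idx)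
          (d2, batches)) = _
    simp only [hmex]
  have hlen : (bs.map (·.2)).length = bs.length := List.length_map ..
  refine ⟨?_, ?_, ?_⟩
  · rw [hstep, pvPlaceA_eq]
    simp only [hlen]
    by_cases hk : pvIdxA edge.1 edge.2.1 bs = bs.length
    · rw [if_pos hk, if_pos hk, List.map_append]; rfl
    · rw [if_neg hk, if_neg hk, pvMapModify]
  · intro n i
    rw [hstep]
    simp only
    rw [pvDictUpdate_mem, hmemInv n i,
      pvPlaceA_nodes edge.1 edge.2.1 edge bs (pvIdxA_free edge.1 edge.2.1 bs) n i]
  · intro n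
    rw [hstep]
    simp only
    exact pvDictUpdate_nodup d edge.1 edge.2.1 _ hndInv n

lemma pvFold_sim (edges : List PVEdge) :
    ∀ (bs : List (PySem.Set String × List PVEdge)) (d : PySem.Dict String (PySem.Set Nat)),
      pvInv bs d →
      (edges.foldl pvStepB (d, bs.map (·.2))).2 =
        (edges.foldl (fun bs e => pvPlaceA e.1 e.2.1 e bs) bs).map (·.2) := by
  induction edges with
  | nil => intro bs d _; rfl
  | cons e rest ih =>
      intro bs d hInv
      obtain ⟨h1, h2⟩ := pvStep_sim bs d hInv e
      have hpair : (pvStepB (d, bs.map (·.2)) e) =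
          ((pvStepB (d, bs.map (·.2)) e).1, (pvPlaceA e.1 e.2.1 e bs).map (·.2)) :=
        Prod.ext rfl h1
      simp only [List.foldl_cons]
      rw [hpair]
      exact ih _ _ h2

lemma pvInv_empty : pvInv [] PySem.Dict.empty := by
  constructor
  · intro n i
    rw [PySem.Dict.getD_empty]
    simp [PySem.Set.empty]
  · intro n
    rw [PySem.Dict.getD_empty]
    exact List.nodup_nil

-- ===== VERDICT (by name: the statement is the Claim_ definition above) =====
theorem partition_edges_by_endpoints_py_spec : Claim_equal_partition_edges_by_endpoints_py := by
  intro edges _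
  unfold Spec_partition_edges_by_endpoints_py partition_edges_by_endpoints_py partition_edges_by_endpoints_py_alt
  have h := pvFold_sim edges [] PySem.Dict.empty pvInv_empty
  simp only [List.map_nil] at h
  rw [← h]
  split
  · rename_i he; subst he; rfl
  · rfl
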